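-- pv_equiv track=rewrite | github.com/khushal123/python-excercises | assignment1.py | get_first_day_participents
-- ===== SOURCE A (Python) =====
-- def get_first_day_participents(participent_list):
--     day_one_participents = participent_list[0]
--     subsequent_days_list = sum(participent_list[1:], [])
--     first_day_only = []
--     for participent in day_one_participents:
--         if participent not in subsequent_days_list:
--             first_day_only.append(participent)
--     return first_day_only
-- ===== SOURCE B (Python) =====
-- def get_first_day_participents(participent_list):
--     result = list(participent_list[0])
--     for day in participent_list[1:]:
--         result = [p for p in result if p not in day]
--     return result
-- ===== Notes on version B (the rewrite author's own statement) =====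
-- stated objective: faster
-- what changed: Instead of flattening all later days into one list and testing each day-one participant against it, B keeps an evolving candidate list and filters it through each later day in turn; no flattened list is built and the candidate list shrinks as matches are removed.
import Mathlib
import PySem

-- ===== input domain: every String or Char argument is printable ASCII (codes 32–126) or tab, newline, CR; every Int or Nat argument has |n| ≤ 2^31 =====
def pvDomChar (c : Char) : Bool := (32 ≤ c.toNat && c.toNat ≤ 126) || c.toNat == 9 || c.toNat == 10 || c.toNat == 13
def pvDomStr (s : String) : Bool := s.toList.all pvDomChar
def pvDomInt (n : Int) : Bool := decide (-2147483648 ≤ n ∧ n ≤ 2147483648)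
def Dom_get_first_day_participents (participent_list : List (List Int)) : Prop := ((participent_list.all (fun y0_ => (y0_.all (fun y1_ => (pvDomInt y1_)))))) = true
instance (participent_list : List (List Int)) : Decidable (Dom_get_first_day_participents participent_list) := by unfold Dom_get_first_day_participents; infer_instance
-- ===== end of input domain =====

-- B keeps an evolving candidate list filtered through each later day instead of
-- flattening the later days and testing membership once per day-one participant (objective: alternative).

-- ===== PORT A =====
def get_first_day_participents (participent_list : List (List Int)) : List Int :=
  let day_one_participents := (PySem.List.pyGet? participent_list 0).getD []
  let subsequent_days_list := (PySem.List.slice participent_list (some 1) none).foldl (· ++ ·) []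
  day_one_participents.foldl
    (fun first_day_only p => if p ∈ subsequent_days_list then first_day_only else first_day_only ++ [p]) []

-- ===== PORT B =====
def get_first_day_participents_alt (participent_list : List (List Int)) : List Int :=
  let result := (PySem.List.pyGet? participent_list 0).getD []
  (PySem.List.slice participent_list (some 1) none).foldl
    (fun result day => result.filter (fun p => decide (p ∉ day))) result

-- ===== PRECONDITION & SPEC =====
-- Pre_ excludes only the empty list, on which participent_list[0] raises IndexError in both A and B.
def Pre_get_first_day_participents (participent_list : List (List Int)) : Prop := participent_list ≠ []
instance (participent_list : List (List Int)) : Decidable (Pre_get_first_day_participents participent_list) := by unfold Pre_get_first_day_participents; infer_instance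
def pvWitness_get_first_day_participents : List (List Int) := [[1, 2, 3, 2], [2, 4], [5]]

def Spec_get_first_day_participents (participent_list : List (List Int)) (out : List Int) : Prop := out = get_first_day_participents_alt participent_list
instance (participent_list : List (List Int)) (out : List Int) : Decidable (Spec_get_first_day_participents participent_list out) := by unfold Spec_get_first_day_participents; infer_instance

-- ===== CLAIM (what is proved, stated in full; the proofs are below) =====
def Claim_equal_get_first_day_participents : Prop := ∀ (participent_list : List (List Int)), Dom_get_first_day_participents participent_list → Pre_get_first_day_participents participent_list → Spec_get_first_day_participents participent_list (get_first_day_participents participent_list)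

-- ===== LEMMAS AND PROOFS =====

-- A's loop: append-if-absent over day one is a filter against the flattened later days.
theorem loopA (S : List Int) (d acc : List Int) :
    d.foldl (fun acc p => if p ∈ S then acc else acc ++ [p]) acc
      = acc ++ d.filter (fun p => decide (p ∉ S)) := by
  induction d generalizing acc with
  | nil => simp
  | cons x xs ih =>
    by_cases h : x ∈ S <;> simp [List.foldl_cons, h, ih]

theorem foldl_append_flatten (ds : List (List Int)) (acc : List Int) :
    ds.foldl (fun x1 x2 => x1 ++ x2) acc = acc ++ ds.flatten := by
  induction ds generalizing acc with
  | nil => simp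
  | cons d ds ih => simp [ih]

-- B's loop: successive per-day filters equal one filter against the concatenation of the days.
theorem loopB (days : List (List Int)) (r : List Int) :
    days.foldl (fun res day => res.filter (fun p => decide (p ∉ day))) r
      = r.filter (fun p => decide (p ∉ days.foldl (· ++ ·) [])) := by
  induction days generalizing r with
  | nil => simp
  | cons d ds ih =>
    simp only [List.foldl_cons, ih, List.filter_filter, foldl_append_flatten]
    refine List.filter_congr ?_
    intro p _
    simp [List.mem_append, not_or, Bool.and_comm]

-- ===== VERDICT (by name: the statement is the Claim_ definition above) =====
theorem get_first_day_participents_spec : Claim_equal_get_first_day_participents := by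
  intro l _ hpre
  unfold Spec_get_first_day_participents
  match l, hpre with
  | x :: xs, _ =>
    simp only [get_first_day_participents, get_first_day_participents_alt,
      PySem.List.pyGet?_zero_cons, Option.getD_some]
    rw [show PySem.List.slice (x :: xs) (some 1) none = xs by
          simpa using PySem.List.slice_from_natCast (xs := x :: xs) (a := 1)]
    rw [loopA, loopB]
    simp
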